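-- pv_equiv track=rewrite | github.com/jamisonassuncao/mandyoc-scripts | functions/mandyocIO.py | change_dataset
-- ===== SOURCE A (Python) =====
-- def change_dataset(properties, datasets):
--     '''
--     Create new_datasets based on the properties that will be plotted
--
--     Parameters
--     ----------
--     properties: list of strings
--         Properties to plot.
--
--     datasets: list of strings
--         List of saved properties.
--
--     Returns
--     -------
--     new_datasets: list of strings
--         New list of properties that will be read.
--     '''
--
--     new_datasets = []
--     for prop in properties:
--         if (prop in datasets) and (prop not in new_datasets):
--             new_datasets.append(prop)
--         if (prop == "lithology") and ("strain" not in new_datasets):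
--             new_datasets.append("strain")
--         if (prop == "temperature_anomaly") and ("temperature" not in new_datasets):
--             new_datasets.append("temperature")
--
--         if (prop == "lithology" or prop == 'temperature_anomlay') and ("density" not in new_datasets):
--             new_datasets.append("density")
--
--     return new_datasets
-- ===== SOURCE B (Python) =====
-- def change_dataset(properties, datasets):
--     # Pass 1: generate the raw ordered candidate list (duplicates allowed).
--     raw = []
--     for prop in properties:
--         if prop in datasets:
--             raw.append(prop)
--         if prop == "lithology":
--             raw.append("strain")
--         if prop == "temperature_anomaly":
--             raw.append("temperature")
--         if prop == "lithology" or prop == "temperature_anomlay":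
--             raw.append("density")
--     # Pass 2: order-preserving first-occurrence deduplication.
--     seen = set()
--     out = []
--     for x in raw:
--         if x not in seen:
--             seen.add(x)
--             out.append(x)
--     return out
-- ===== Notes on version B (the rewrite author's own statement) =====
-- stated objective: alternative
-- what changed: A interleaves membership-checked appends inside one loop; B first generates the full ordered candidate list (including the unconditional extras and the 'temperature_anomlay' typo branch) and then deduplicates it keeping first occurrences with a seen set.
import Mathlib
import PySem

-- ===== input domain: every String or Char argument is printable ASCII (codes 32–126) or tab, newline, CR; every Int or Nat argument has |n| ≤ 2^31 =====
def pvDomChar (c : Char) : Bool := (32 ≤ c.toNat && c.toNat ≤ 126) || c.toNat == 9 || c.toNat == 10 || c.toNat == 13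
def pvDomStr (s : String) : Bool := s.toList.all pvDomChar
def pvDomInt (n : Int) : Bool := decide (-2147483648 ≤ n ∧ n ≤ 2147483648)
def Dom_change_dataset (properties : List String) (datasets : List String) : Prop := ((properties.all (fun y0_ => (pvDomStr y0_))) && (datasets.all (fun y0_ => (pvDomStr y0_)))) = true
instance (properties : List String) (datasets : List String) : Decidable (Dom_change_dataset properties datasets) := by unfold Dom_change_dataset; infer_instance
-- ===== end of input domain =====

-- B builds the ordered candidate list first and deduplicates it afterwards (first occurrences);
-- A performs the membership-checked appends interleaved in a single loop.

-- ===== PORT A =====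
-- A's loop body: four sequential conditional appends, each guarded by a membership check.
def changeStepA (datasets : List String) (acc : List String) (prop : String) : List String :=
  let a1 := if prop ∈ datasets ∧ prop ∉ acc then acc ++ [prop] else acc
  let a2 := if prop = "lithology" ∧ "strain" ∉ a1 then a1 ++ ["strain"] else a1
  let a3 := if prop = "temperature_anomaly" ∧ "temperature" ∉ a2 then a2 ++ ["temperature"] else a2
  if (prop = "lithology" ∨ prop = "temperature_anomlay") ∧ "density" ∉ a3 then a3 ++ ["density"] else a3

def change_dataset (properties : List String) (datasets : List String) : List String :=
  properties.foldl (changeStepA datasets) []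

-- ===== PORT B =====
-- B pass 1: the candidates one property contributes to raw.
def changeCand (datasets : List String) (prop : String) : List String :=
  (if prop ∈ datasets then [prop] else []) ++
  (if prop = "lithology" then ["strain"] else []) ++
  (if prop = "temperature_anomaly" then ["temperature"] else []) ++
  (if prop = "lithology" ∨ prop = "temperature_anomlay" then ["density"] else [])

def change_dataset_alt (properties : List String) (datasets : List String) : List String :=
  let raw := properties.flatMap (changeCand datasets)
  -- B pass 2: first-occurrence dedup with a seen set.
  (raw.foldl (fun (st : PySem.Set String × List String) x =>
      if x ∈ st.1 then st else (PySem.Set.add st.1 x, st.2 ++ [x])) (PySem.Set.empty, [])).2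

-- ===== PRECONDITION & SPEC =====
def Spec_change_dataset (properties : List String) (datasets : List String) (out : List String) : Prop := out = change_dataset_alt properties datasets
instance (properties : List String) (datasets : List String) (out : List String) : Decidable (Spec_change_dataset properties datasets out) := by unfold Spec_change_dataset; infer_instance

-- ===== CLAIM (what is proved, stated in full; the proofs are below) =====
def Claim_equal_change_dataset : Prop := ∀ (properties : List String) (datasets : List String), Dom_change_dataset properties datasets → Spec_change_dataset properties datasets (change_dataset properties datasets)

-- ===== LEMMAS AND PROOFS =====

-- first-occurrence dedup relative to a membership predicate
def ddp : (String → Bool) → List String → List String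
  | _, [] => []
  | p, x :: xs => if p x then ddp p xs else x :: ddp (fun y => y == x || p y) xs

theorem ddp_congr (p q : String → Bool) (l : List String) (h : ∀ y, p y = q y) :
    ddp p l = ddp q l := by
  induction l generalizing p q with
  | nil => rfl
  | cons x xs ih =>
      simp only [ddp, h x]
      by_cases hx : q x = true
      · simp [hx, ih p q h]
      · simp only [Bool.not_eq_true] at hx
        simp only [hx, if_neg (Bool.false_ne_true)]
        rw [ih _ _ (fun y => by rw [h y])]

theorem mem_append_single (y x : String) (acc : List String) :
    decide (y ∈ acc ++ [x]) = (y == x || decide (y ∈ acc)) := by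
  by_cases h1 : y = x <;> by_cases h2 : y ∈ acc <;> simp [h1, h2]

def app1 (acc : List String) (x : String) : List String :=
  if x ∈ acc then acc else acc ++ [x]

theorem foldl_app1_eq_ddp (l acc : List String) :
    List.foldl app1 acc l = acc ++ ddp (fun y => decide (y ∈ acc)) l := by
  induction l generalizing acc with
  | nil => simp [ddp]
  | cons x xs ih =>
      by_cases hx : x ∈ acc
      · simp [List.foldl, app1, hx, ddp, ih]
      · simp only [List.foldl, app1, if_neg hx, ddp, decide_eq_true_eq]
        rw [ih (acc ++ [x]),
            ddp_congr _ (fun y => y == x || decide (y ∈ acc)) xs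
              (fun y => mem_append_single y x acc)]
        simp

theorem stepA_eq_foldl (ds acc : List String) (prop : String) :
    changeStepA ds acc prop = List.foldl app1 acc (changeCand ds prop) := by
  unfold changeStepA changeCand
  by_cases h1 : prop ∈ ds <;>
    by_cases h2 : prop = "lithology" <;>
      by_cases h3 : prop = "temperature_anomaly" <;>
        by_cases h4 : prop = "temperature_anomlay" <;>
          simp_all [app1, List.foldl]

theorem foldl_stepA_eq (ds props acc : List String) :
    props.foldl (changeStepA ds) acc
      = List.foldl app1 acc (props.flatMap (changeCand ds)) := by
  induction props generalizing acc with
  | nil => rfl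
  | cons p ps ih =>
      simp only [List.foldl, List.flatMap_cons, List.foldl_append]
      rw [stepA_eq_foldl, ih]

-- B's seen-set fold produces ddp
theorem foldl_seen_eq_ddp (l : List String) (seen : PySem.Set String) (out : List String) :
    (l.foldl (fun (st : PySem.Set String × List String) x =>
        if x ∈ st.1 then st else (PySem.Set.add st.1 x, st.2 ++ [x])) (seen, out)).2
      = out ++ ddp (fun y => decide (y ∈ seen)) l := by
  induction l generalizing seen out with
  | nil => simp [ddp]
  | cons x xs ih =>
      by_cases hx : x ∈ seen
      · simp [List.foldl, hx, ddp, ih]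
      · simp only [List.foldl, if_neg hx, ddp, decide_eq_true_eq]
        have hadd : PySem.Set.add seen x = seen ++ [x] := by
          simp [PySem.Set.add, PySem.Set.contains, hx]
        rw [hadd, ih (seen ++ [x]) (out ++ [x]),
            ddp_congr _ (fun y => y == x || decide (y ∈ seen)) xs
              (fun y => mem_append_single y x seen)]
        simp

-- ===== VERDICT (by name: the statement is the Claim_ definition above) =====
theorem change_dataset_spec : Claim_equal_change_dataset := by
  intro properties datasets _
  unfold Spec_change_dataset change_dataset change_dataset_alt
  rw [foldl_stepA_eq, foldl_app1_eq_ddp, foldl_seen_eq_ddp]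
  rfl
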